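-- pv_equiv track=rewrite | github.com/gregory-adler/To-Do-List | helper_methods.py | organize_list
-- ===== SOURCE A (Python) =====
-- def organize_list (to_do_list):
--     #organizes to_do list into now, soon, and eventually  lists
--     organized_list= []
--     now= []
--     soon= []
--     eventually= []
--
--     for i in range (0, len(to_do_list)):
--         if to_do_list[i][3]<= to_do_list[i][2]:
--             now.append(to_do_list[i])
--         elif to_do_list[i][2]==1:
--             if to_do_list[i][3]>1 and to_do_list[i][3]<=4:
--                 soon.append(to_do_list[i])
--             else:
--                 eventually.append(to_do_list[i])
--         elif to_do_list[i][2]>1 and to_do_list[i][2]<=4: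
--             if to_do_list[i][3]>to_do_list[i][2] and to_do_list[i][3]<=5+(to_do_list[i][2]):
--                 soon.append(to_do_list[i])
--             else:
--                 eventually.append(to_do_list[i])
--         else:
--             if to_do_list[i][3]>to_do_list[i][2] and to_do_list[i][3]<=15:
--                 soon.append(to_do_list[i])
--             else:
--                 eventually.append(to_do_list[i])
--
--
--     #sort the list by days until due
--
--     now= sorted(now, key=lambda x:x[3])
--     soon= sorted(soon, key=lambda x:x[3])
--     eventually= sorted (eventually, key=lambda x:x[3])
--
--     organized_list.append(now)
--     organized_list.append(soon)
--     organized_list.append(eventually)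
--
--
--     return organized_list
-- ===== SOURCE B (Python) =====
-- def organize_list(to_do_list):
--     # One stable sort of the whole list up front (all buckets share key x[3],
--     # so each bucket comes out sorted), then build each bucket as a filter of
--     # the sorted list on a unified numeric category:
--     #   cat = 0 (now) if d <= c; otherwise d > c always holds, and A's "soon"
--     #   tests reduce to d <= ub with ub = 4 if c == 1, 5 + c if 1 < c <= 4,
--     #   else 15; cat = 1 (soon) if d <= ub, else 2 (eventually).
--     def cat(x):
--         c, d = x[2], x[3]
--         if d <= c:
--             return 0
--         ub = 4 if c == 1 else (5 + c if 1 < c <= 4 else 15)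
--         return 1 if d <= ub else 2
--     s = sorted(to_do_list, key=lambda x: x[3])
--     return [[x for x in s if cat(x) == k] for k in range(3)]
-- ===== Notes on version B (the rewrite author's own statement) =====
-- stated objective: alternative
-- what changed: B sorts the whole list once (stable, shared key x[3]) and then builds each bucket as a filter of the sorted list on a single numeric category function that collapses A's nested branch conditions into one upper-bound formula, instead of A's classify-into-three-accumulators loop followed by three per-bucket sorts.
import Mathlib
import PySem

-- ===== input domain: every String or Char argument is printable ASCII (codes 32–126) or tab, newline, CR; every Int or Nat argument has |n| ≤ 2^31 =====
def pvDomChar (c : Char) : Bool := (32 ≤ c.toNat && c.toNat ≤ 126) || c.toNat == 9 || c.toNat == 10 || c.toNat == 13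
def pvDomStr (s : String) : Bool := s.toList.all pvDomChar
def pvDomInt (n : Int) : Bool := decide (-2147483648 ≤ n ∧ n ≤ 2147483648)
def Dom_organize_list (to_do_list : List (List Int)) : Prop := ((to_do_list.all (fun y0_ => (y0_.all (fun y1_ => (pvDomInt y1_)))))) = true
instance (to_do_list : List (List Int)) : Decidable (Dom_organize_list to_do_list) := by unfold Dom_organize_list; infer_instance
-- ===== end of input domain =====

-- B sorts the whole list once (stable, shared key x[3]) and builds each bucket by
-- filtering the sorted list on one numeric category function; objective: alternative
-- decomposition, not claimed faster.

-- ===== PORT A =====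
-- the `| _, _ => s` branches are unreachable under Pre_ (rows have length ≥ 4; Python raises IndexError there)
def organize_list (to_do_list : List (List Int)) : List (List (List Int)) :=
  let s := (PySem.List.pyRange 0 (PySem.List.len to_do_list)).foldl
    (fun (s : List (List Int) × List (List Int) × List (List Int)) i =>
      (fun (s : List (List Int) × List (List Int) × List (List Int)) (row : List Int) =>
        match PySem.List.pyGet? row 3, PySem.List.pyGet? row 2 with
        | some d, some c =>
          if d ≤ c then (s.1 ++ [row], s.2.1, s.2.2)
          else if c = 1 then
            if 1 < d ∧ d ≤ 4 then (s.1, s.2.1 ++ [row], s.2.2)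
            else (s.1, s.2.1, s.2.2 ++ [row])
          else if 1 < c ∧ c ≤ 4 then
            if c < d ∧ d ≤ 5 + c then (s.1, s.2.1 ++ [row], s.2.2)
            else (s.1, s.2.1, s.2.2 ++ [row])
          else
            if c < d ∧ d ≤ 15 then (s.1, s.2.1 ++ [row], s.2.2)
            else (s.1, s.2.1, s.2.2 ++ [row])
        | _, _ => s) s (PySem.List.pyGetD to_do_list i []))
    ([], [], [])
  [PySem.List.sorted s.1 (fun x => PySem.List.pyGetD x 3 0),
   PySem.List.sorted s.2.1 (fun x => PySem.List.pyGetD x 3 0),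
   PySem.List.sorted s.2.2 (fun x => PySem.List.pyGetD x 3 0)]

-- ===== PORT B =====
-- Source B's cat(x): 0 = now, 1 = soon, 2 = eventually
def pvCat (x : List Int) : Int :=
  let c := PySem.List.pyGetD x 2 0
  let d := PySem.List.pyGetD x 3 0
  if d ≤ c then 0
  else
    let ub : Int := if c = 1 then 4 else if 1 < c ∧ c ≤ 4 then 5 + c else 15
    if d ≤ ub then 1 else 2

def organize_list_alt (to_do_list : List (List Int)) : List (List (List Int)) :=
  let s := PySem.List.sorted to_do_list (fun x => PySem.List.pyGetD x 3 0)
  (PySem.List.pyRange 0 3).map (fun k => s.filter (fun x => pvCat x == k))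

-- ===== PRECONDITION & SPEC =====
-- Pre_: Python A indexes row[3]/row[2] of every row, raising IndexError on a row shorter
-- than 4; exactly those inputs are excluded.
def Pre_organize_list (to_do_list : List (List Int)) : Prop :=
  ∀ row ∈ to_do_list, 4 ≤ row.length
instance (to_do_list : List (List Int)) : Decidable (Pre_organize_list to_do_list) := by unfold Pre_organize_list; infer_instance

def pvWitness_organize_list : List (List Int) := [[1, 0, 2, 9, 7], [2, 0, 1, 3], [3, 0, 1, 3]]

def Spec_organize_list (to_do_list : List (List Int)) (out : List (List (List Int))) : Prop := out = organize_list_alt to_do_list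
instance (to_do_list : List (List Int)) (out : List (List (List Int))) : Decidable (Spec_organize_list to_do_list out) := by unfold Spec_organize_list; infer_instance

-- ===== CLAIM (what is proved, stated in full; the proofs are below) =====
def Claim_equal_organize_list : Prop := ∀ (to_do_list : List (List Int)), Dom_organize_list to_do_list → Pre_organize_list to_do_list → Spec_organize_list to_do_list (organize_list to_do_list)

-- ===== LEMMAS AND PROOFS =====

def pvNow (x : List Int) : Bool :=
  PySem.List.pyGetD x 3 0 ≤ PySem.List.pyGetD x 2 0
def pvSoon (x : List Int) : Bool :=
  let d := PySem.List.pyGetD x 3 0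
  let c := PySem.List.pyGetD x 2 0
  !(d ≤ c) && (if c = 1 then decide (1 < d ∧ d ≤ 4)
               else if 1 < c ∧ c ≤ 4 then decide (c < d ∧ d ≤ 5 + c)
               else decide (c < d ∧ d ≤ 15))
def pvEv (x : List Int) : Bool := !(pvNow x) && !(pvSoon x)

lemma cat_zero (x : List Int) : (pvCat x == 0) = pvNow x := by
  simp only [pvCat, pvNow]
  generalize PySem.List.pyGetD x 3 0 = d
  generalize PySem.List.pyGetD x 2 0 = c
  split_ifs <;> simp_all

lemma cat_one (x : List Int) : (pvCat x == 1) = pvSoon x := by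
  simp only [pvCat, pvSoon]
  generalize PySem.List.pyGetD x 3 0 = d
  generalize PySem.List.pyGetD x 2 0 = c
  split_ifs <;> simp_all

lemma cat_two (x : List Int) : (pvCat x == 2) = pvEv x := by
  simp only [pvEv, ← cat_zero, ← cat_one, pvCat]
  generalize PySem.List.pyGetD x 3 0 = d
  generalize PySem.List.pyGetD x 2 0 = c
  split_ifs <;> simp_all

lemma pyGet?_of_len4 (row : List Int) (k : Nat) (hk : k < 4) (h : 4 ≤ row.length) :
    PySem.List.pyGet? row (k : Int) = some (row.getD k 0) := by
  have := PySem.List.pyGet?_natCast row k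
  rw [this, List.getElem?_eq_getElem (by omega), List.getD_eq_getElem _ _ (by omega)]

lemma step_eq (s : List (List Int) × List (List Int) × List (List Int)) (row : List Int)
    (h : 4 ≤ row.length) :
    (match PySem.List.pyGet? row 3, PySem.List.pyGet? row 2 with
      | some d, some c =>
        if d ≤ c then (s.1 ++ [row], s.2.1, s.2.2)
        else if c = 1 then
          if 1 < d ∧ d ≤ 4 then (s.1, s.2.1 ++ [row], s.2.2)
          else (s.1, s.2.1, s.2.2 ++ [row])
        else if 1 < c ∧ c ≤ 4 then
          if c < d ∧ d ≤ 5 + c then (s.1, s.2.1 ++ [row], s.2.2)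
          else (s.1, s.2.1, s.2.2 ++ [row])
        else
          if c < d ∧ d ≤ 15 then (s.1, s.2.1 ++ [row], s.2.2)
          else (s.1, s.2.1, s.2.2 ++ [row])
      | _, _ => s) =
    (s.1 ++ (if pvNow row then [row] else []),
     s.2.1 ++ (if pvSoon row then [row] else []),
     s.2.2 ++ (if pvEv row then [row] else [])) := by
  have h3 : PySem.List.pyGet? row (3 : Int) = some (row.getD 3 0) := by
    exact_mod_cast pyGet?_of_len4 row 3 (by omega) h
  have h2 : PySem.List.pyGet? row (2 : Int) = some (row.getD 2 0) := by
    exact_mod_cast pyGet?_of_len4 row 2 (by omega) h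
  rw [h3, h2]
  simp only [pvNow, pvSoon, pvEv, PySem.List.pyGetD_ofNat']
  generalize row.getD 3 0 = d
  generalize row.getD 2 0 = c
  by_cases h1 : d ≤ c
  · simp [h1]
  · by_cases hc1 : c = 1
    · subst hc1
      by_cases hs : 1 < d ∧ d ≤ 4 <;> simp [h1, hs]
    · by_cases hc4 : 1 < c ∧ c ≤ 4
      · by_cases hs : c < d ∧ d ≤ 5 + c <;> simp [h1, hc1, hc4, hs]
      · by_cases hs : c < d ∧ d ≤ 15 <;> simp [h1, hc1, hc4, hs]

-- folding the classification step over a list of (length ≥ 4) rows filters into buckets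
lemma foldl_step (xs : List (List Int)) (h : ∀ row ∈ xs, 4 ≤ row.length)
    (a b c : List (List Int)) :
    xs.foldl
      (fun (s : List (List Int) × List (List Int) × List (List Int)) (row : List Int) =>
        match PySem.List.pyGet? row 3, PySem.List.pyGet? row 2 with
        | some d, some c =>
          if d ≤ c then (s.1 ++ [row], s.2.1, s.2.2)
          else if c = 1 then
            if 1 < d ∧ d ≤ 4 then (s.1, s.2.1 ++ [row], s.2.2)
            else (s.1, s.2.1, s.2.2 ++ [row])
          else if 1 < c ∧ c ≤ 4 then
            if c < d ∧ d ≤ 5 + c then (s.1, s.2.1 ++ [row], s.2.2)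
            else (s.1, s.2.1, s.2.2 ++ [row])
          else
            if c < d ∧ d ≤ 15 then (s.1, s.2.1 ++ [row], s.2.2)
            else (s.1, s.2.1, s.2.2 ++ [row])
        | _, _ => s)
      (a, b, c) =
    (a ++ xs.filter pvNow, b ++ xs.filter pvSoon, c ++ xs.filter pvEv) := by
  induction xs generalizing a b c with
  | nil => simp
  | cons x t ih =>
    rw [List.foldl_cons, step_eq (a, b, c) x (h x (by simp))]
    rw [ih (fun r hr => h r (by simp [hr]))]
    by_cases h0 : pvNow x <;> by_cases h1 : pvSoon x <;>
      simp [pvEv, h0, h1]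

lemma filter_insertBy_of_not_kept (key : List Int → Int) (p : List Int → Bool)
    (x : List Int) (hx : p x = false) (ys : List (List Int)) :
    (PySem.List.insertBy (fun a b => decide (key a < key b)) x ys).filter p = ys.filter p := by
  induction ys with
  | nil => simp [PySem.List.insertBy, hx]
  | cons y t ih =>
    rw [PySem.List.insertBy]
    split
    · simp [List.filter_cons, hx]
    · rw [List.filter_cons, List.filter_cons, ih]

lemma insertBy_of_forall_before (key : List Int → Int) (x : List Int)
    (l : List (List Int)) (h : ∀ z ∈ l, key x < key z) :
    PySem.List.insertBy (fun a b => decide (key a < key b)) x l = x :: l := by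
  cases l with
  | nil => rfl
  | cons y t => rw [PySem.List.insertBy, if_pos (by simpa using h y (by simp))]

lemma filter_insertBy (key : List Int → Int) (p : List Int → Bool) (x : List Int)
    (ys : List (List Int)) (hp : ys.Pairwise (fun a b => key a ≤ key b)) :
    (PySem.List.insertBy (fun a b => decide (key a < key b)) x ys).filter p =
      if p x then PySem.List.insertBy (fun a b => decide (key a < key b)) x (ys.filter p)
      else ys.filter p := by
  by_cases hx : p x
  case neg =>
    rw [if_neg hx, filter_insertBy_of_not_kept key p x (by simpa using hx) ys]
  case pos =>
    rw [if_pos hx]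
    induction ys with
    | nil => simp [PySem.List.insertBy, hx]
    | cons y t ih =>
      rcases List.pairwise_cons.mp hp with ⟨hy, ht⟩
      rw [PySem.List.insertBy]
      split
      case isTrue hb =>
        have hall : ∀ z ∈ (y :: t).filter p, key x < key z := by
          intro z hz
          rcases List.mem_cons.mp (List.mem_of_mem_filter hz) with hz' | hz'
          · subst hz'; simpa using hb
          · exact lt_of_lt_of_le (by simpa using hb) (hy z hz')
        rw [insertBy_of_forall_before key x _ hall]
        simp [List.filter_cons, hx]
      case isFalse hb =>
        by_cases hy' : p y
        · rw [List.filter_cons, List.filter_cons, if_pos hy', if_pos hy',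
            PySem.List.insertBy, if_neg hb, ih ht]
        · rw [List.filter_cons, List.filter_cons, if_neg hy', if_neg hy', ih ht]

lemma filter_sorted (xs : List (List Int)) (key : List Int → Int) (p : List Int → Bool) :
    PySem.List.sorted (xs.filter p) key = (PySem.List.sorted xs key).filter p := by
  induction xs using List.reverseRecOn with
  | nil => simp [PySem.List.sorted_eq_foldl_insertBy]
  | append_singleton t x ih =>
    rw [PySem.List.sorted_eq_foldl_insertBy (t ++ [x]) key, List.foldl_append,
      ← PySem.List.sorted_eq_foldl_insertBy t key, List.foldl_cons, List.foldl_nil,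
      filter_insertBy key p x _ (PySem.List.sorted_pairwise t key),
      List.filter_append]
    by_cases hx : p x
    · rw [if_pos hx]
      rw [PySem.List.sorted_eq_foldl_insertBy (t.filter p ++ (x :: []).filter p) key]
      simp only [List.filter_cons, hx, if_pos, List.filter_nil]
      rw [List.foldl_append,
        ← PySem.List.sorted_eq_foldl_insertBy (t.filter p) key, List.foldl_cons,
        List.foldl_nil, ih]
    · simp [hx, ih]

-- ===== VERDICT (by name: the statement is the Claim_ definition above) =====
theorem organize_list_spec : Claim_equal_organize_list := by
  intro xs _ hpre
  unfold Spec_organize_list organize_list organize_list_alt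
  rw [PySem.List.foldl_pyRange_pyGetD xs ([] : List Int)
      (fun (s : List (List Int) × List (List Int) × List (List Int)) (row : List Int) =>
        match PySem.List.pyGet? row 3, PySem.List.pyGet? row 2 with
        | some d, some c =>
          if d ≤ c then (s.1 ++ [row], s.2.1, s.2.2)
          else if c = 1 then
            if 1 < d ∧ d ≤ 4 then (s.1, s.2.1 ++ [row], s.2.2)
            else (s.1, s.2.1, s.2.2 ++ [row])
          else if 1 < c ∧ c ≤ 4 then
            if c < d ∧ d ≤ 5 + c then (s.1, s.2.1 ++ [row], s.2.2)
            else (s.1, s.2.1, s.2.2 ++ [row])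
          else
            if c < d ∧ d ≤ 15 then (s.1, s.2.1 ++ [row], s.2.2)
            else (s.1, s.2.1, s.2.2 ++ [row])
        | _, _ => s)
      (([], [], []) : List (List Int) × List (List Int) × List (List Int)) (le_refl 0)]
  simp only [Int.toNat_zero, List.drop_zero]
  rw [foldl_step xs hpre [] [] []]
  have hr : PySem.List.pyRange 0 3 = [(0 : Int), 1, 2] := by decide
  rw [hr]
  simp only [List.map_cons, List.map_nil, List.nil_append]
  rw [filter_sorted xs _ pvNow, filter_sorted xs _ pvSoon, filter_sorted xs _ pvEv]
  rw [List.filter_congr (fun x _ => (cat_zero x).symm),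
    List.filter_congr (fun x _ => (cat_one x).symm),
    List.filter_congr (fun x _ => (cat_two x).symm)]
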